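-- pv_equiv track=rewrite | github.com/serajang99/PreparingCodingTest | 모의코테1차/test4.py | get_dist_sum
-- ===== SOURCE A (Python) =====
-- def get_dist_sum(houses, n):
--     left, right, dist = 0, 0, 0
--     for house in houses:
--         if house < n:
--             left += house-n
--         else:
--             right += house-n
--         dist += abs(house-n)
--     return abs(left), right, dist
-- ===== SOURCE B (Python) =====
-- def get_dist_sum(houses, n):
--     hs = sorted(houses)
--     # binary search for the first index whose house is >= n
--     lo, hi = 0, len(hs)
--     while lo < hi:
--         mid = (lo + hi) // 2
--         if hs[mid] < n:
--             lo = mid + 1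
--         else:
--             hi = mid
--     below = hs[:lo]
--     above = hs[lo:]
--     left = n * len(below) - sum(below)
--     right = sum(above) - n * len(above)
--     return left, right, left + right
-- ===== Notes on version B (the rewrite author's own statement) =====
-- stated objective: alternative
-- what changed: Instead of A's single fused three-accumulator loop over the raw list, B sorts the houses, finds the partition point before n by binary search, slices the sorted list there, and computes all three results arithmetically from the two slices' sums and lengths (left = n*k - sum(below), right = sum(above) - n*(len-k), dist = left + right).
import Mathlib
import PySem

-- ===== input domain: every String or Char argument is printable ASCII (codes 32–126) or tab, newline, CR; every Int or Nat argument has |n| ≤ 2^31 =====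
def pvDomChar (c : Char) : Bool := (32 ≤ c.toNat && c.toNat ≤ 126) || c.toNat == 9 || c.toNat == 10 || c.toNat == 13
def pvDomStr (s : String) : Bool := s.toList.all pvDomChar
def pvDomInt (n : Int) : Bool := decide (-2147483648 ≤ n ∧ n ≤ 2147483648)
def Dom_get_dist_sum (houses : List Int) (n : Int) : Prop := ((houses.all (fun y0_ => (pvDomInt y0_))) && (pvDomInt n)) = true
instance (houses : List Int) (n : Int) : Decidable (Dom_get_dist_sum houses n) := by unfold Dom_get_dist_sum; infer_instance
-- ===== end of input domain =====

-- B replaces A's fused three-accumulator loop by sort + binary search for the partition point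
-- before n + arithmetic on the two slices' sums and lengths (alternative algorithm, same results).

-- ===== PORT A =====
-- A's loop body: update (left, right, dist) with one house
def stepA (n : Int) (acc : Int × Int × Int) (house : Int) : Int × Int × Int :=
  if house < n then (acc.1 + (house - n), acc.2.1, acc.2.2 + |house - n|)
  else (acc.1, acc.2.1 + (house - n), acc.2.2 + |house - n|)

def get_dist_sum (houses : List Int) (n : Int) : Int × Int × Int :=
  let s := houses.foldl (stepA n) (0, 0, 0)
  (|s.1|, s.2.1, s.2.2)

-- ===== PORT B =====
-- B's while loop: binary search for the first index whose house is >= n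
-- (hs[mid] is always in range when called with hi ≤ hs.length; getD 0 is the total rendering)
def bsearch (hs : List Int) (n : Int) (lo hi : Nat) : Nat :=
  if _h : lo < hi then
    let mid := (lo + hi) / 2
    if hs.getD mid 0 < n then bsearch hs n (mid + 1) hi else bsearch hs n lo mid
  else lo
termination_by hi - lo
decreasing_by all_goals omega

def get_dist_sum_alt (houses : List Int) (n : Int) : Int × Int × Int :=
  let hs := PySem.List.sorted houses (fun x => x) false
  let lo := bsearch hs n 0 hs.length
  let below := PySem.List.slice hs none (some (lo : Int))
  let above := PySem.List.slice hs (some (lo : Int)) none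
  let left := n * below.length - below.sum
  let right := above.sum - n * above.length
  (left, right, left + right)

-- ===== PRECONDITION & SPEC =====
def Spec_get_dist_sum (houses : List Int) (n : Int) (out : Int × Int × Int) : Prop := out = get_dist_sum_alt houses n
instance (houses : List Int) (n : Int) (out : Int × Int × Int) : Decidable (Spec_get_dist_sum houses n out) := by unfold Spec_get_dist_sum; infer_instance

-- ===== CLAIM (what is proved, stated in full; the proofs are below) =====
def Claim_equal_get_dist_sum : Prop := ∀ (houses : List Int) (n : Int), Dom_get_dist_sum houses n → Spec_get_dist_sum houses n (get_dist_sum houses n)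

-- ===== LEMMAS AND PROOFS =====

-- A's fold, started from arbitrary accumulators, expressed through filtered sums
theorem get_dist_sum_fold (houses : List Int) (n : Int) :
    ∀ (l r d : Int),
      houses.foldl (stepA n) (l, r, d)
      = (l + ((houses.filter (fun h => h < n)).map (fun h => h - n)).sum,
         r + ((houses.filter (fun h => ¬ h < n)).map (fun h => h - n)).sum,
         d + (- ((houses.filter (fun h => h < n)).map (fun h => h - n)).sum
              + ((houses.filter (fun h => ¬ h < n)).map (fun h => h - n)).sum)) := by
  induction houses with
  | nil => intro l r d; simp
  | cons h t ih =>
    intro l r d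
    rw [List.foldl_cons]
    by_cases hc : h < n
    · have habs : |h - n| = -(h - n) := abs_of_neg (by omega)
      have hn : ¬ n ≤ h := by omega
      have hstep : stepA n (l, r, d) h = (l + (h - n), r, d + -(h - n)) := by
        simp [stepA, hc, habs]
      have hf1 : (h :: t).filter (fun h => h < n) = h :: t.filter (fun h => h < n) := by
        simp [hc]
      have hf2 : (h :: t).filter (fun h => ¬ h < n) = t.filter (fun h => ¬ h < n) := by
        simp [hn]
      rw [hstep, ih, hf1, hf2, List.map_cons, List.sum_cons,
        Prod.mk.injEq, Prod.mk.injEq]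
      exact ⟨by ring, rfl, by ring⟩
    · have habs : |h - n| = h - n := abs_of_nonneg (by omega)
      have hn : n ≤ h := by omega
      have hstep : stepA n (l, r, d) h = (l, r + (h - n), d + (h - n)) := by
        simp [stepA, hc, habs]
      have hf1 : (h :: t).filter (fun h => h < n) = t.filter (fun h => h < n) := by
        simp [hc]
      have hf2 : (h :: t).filter (fun h => ¬ h < n) = h :: t.filter (fun h => ¬ h < n) := by
        simp [hn]
      rw [hstep, ih, hf1, hf2, List.map_cons, List.sum_cons,
        Prod.mk.injEq, Prod.mk.injEq]
      exact ⟨rfl, by ring, by ring⟩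

-- the left bucket's sum is nonpositive, so its absolute value is its negation
theorem left_sum_nonpos (houses : List Int) (n : Int) :
    ((houses.filter (fun h => h < n)).map (fun h => h - n)).sum ≤ 0 := by
  induction houses with
  | nil => simp
  | cons h t ih =>
    by_cases hc : h < n
    · have hf : (h :: t).filter (fun x => x < n) = h :: t.filter (fun x => x < n) := by
        simp [hc]
      rw [hf, List.map_cons, List.sum_cons]
      omega
    · have hf : (h :: t).filter (fun x => x < n) = t.filter (fun x => x < n) := by
        simp [hc]
      rw [hf]; exact ih

-- the binary search, on a sorted list, returns the partition point before n
theorem bsearch_spec (hs : List Int) (n : Int)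
    (hp : hs.Pairwise (fun a b => a ≤ b)) :
    ∀ (lo hi : Nat), lo ≤ hi → hi ≤ hs.length →
      (∀ j, j < lo → (hj : j < hs.length) → hs[j] < n) →
      (∀ j, hi ≤ j → (hj : j < hs.length) → ¬ hs[j] < n) →
      bsearch hs n lo hi ≤ hs.length ∧
      (∀ j, j < bsearch hs n lo hi → (hj : j < hs.length) → hs[j] < n) ∧
      (∀ j, bsearch hs n lo hi ≤ j → (hj : j < hs.length) → ¬ hs[j] < n) := by
  have hmono := List.pairwise_iff_getElem.mp hp
  intro lo hi
  induction lo, hi using bsearch.induct hs n with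
  | case1 lo hi hlt mid hmidlt ih =>
    intro hle hhi hlo hhiP
    have hm : mid = (lo + hi) / 2 := rfl
    have hmid : mid < hs.length := by rw [hm]; omega
    have hmidv : hs[mid] < n := by
      rw [← List.getD_eq_getElem hs 0 hmid]; exact hmidlt
    rw [bsearch, dif_pos hlt, if_pos (hm ▸ hmidlt), ← hm]
    refine ih (by rw [hm]; omega) hhi ?_ hhiP
    intro j hj hjlen
    rcases Nat.lt_or_ge j mid with hj' | hj'
    · exact lt_of_le_of_lt (hmono j mid hjlen hmid hj') hmidv
    · have : j = mid := by omega
      subst this; exact hmidv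
  | case2 lo hi hlt mid hmidge ih =>
    intro hle hhi hlo hhiP
    have hm : mid = (lo + hi) / 2 := rfl
    have hmid : mid < hs.length := by rw [hm]; omega
    have hmidv : ¬ hs[mid] < n := by
      rw [← List.getD_eq_getElem hs 0 hmid]; exact hmidge
    rw [bsearch, dif_pos hlt, if_neg (hm ▸ hmidge), ← hm]
    refine ih (by rw [hm]; omega) hmid.le hlo ?_
    intro j hj hjlen
    rcases Nat.lt_or_ge mid j with hj' | hj'
    · have := hmono mid j hmid hjlen hj'
      omega
    · have : j = mid := by omega
      subst this; exact hmidv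
  | case3 lo hi hnlt =>
    intro hle hhi hlo hhiP
    rw [bsearch, dif_neg hnlt]
    have : lo = hi := by omega
    subst this
    exact ⟨hhi, hlo, hhiP⟩

-- take of the partition point is the filter of the below-n houses (and drop the rest)
theorem take_eq_filter (hs : List Int) (n : Int) (k : Nat) (hk : k ≤ hs.length)
    (hbelow : ∀ j, j < k → (hj : j < hs.length) → hs[j] < n)
    (habove : ∀ j, k ≤ j → (hj : j < hs.length) → ¬ hs[j] < n) :
    hs.take k = hs.filter (fun h => h < n) ∧ hs.drop k = hs.filter (fun h => ¬ h < n) := by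
  have hsplit : hs = hs.take k ++ hs.drop k := (List.take_append_drop k hs).symm
  have htake : ∀ a ∈ hs.take k, decide (a < n) = true := by
    intro a ha
    obtain ⟨i, hi, hget⟩ := List.mem_iff_getElem.mp ha
    have hilen : i < hs.length := lt_of_lt_of_le (lt_of_lt_of_le hi (by simp)) (le_refl _)
    have hik : i < k := lt_of_lt_of_le hi (by simp [List.length_take])
    have : (hs.take k)[i] = hs[i] := List.getElem_take
    rw [this] at hget
    simpa [hget] using hbelow i hik hilen
  have hdrop : ∀ a ∈ hs.drop k, decide (¬ a < n) = true := by
    intro a ha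
    obtain ⟨i, hi, hget⟩ := List.mem_iff_getElem.mp ha
    have hlen : (hs.drop k).length = hs.length - k := List.length_drop
    have hilen : k + i < hs.length := by omega
    have : (hs.drop k)[i] = hs[k + i] := List.getElem_drop
    rw [this] at hget
    simpa [hget] using habove (k + i) (by omega) hilen
  constructor
  · conv_rhs => rw [hsplit]
    rw [List.filter_append, List.filter_eq_self.mpr htake,
      List.filter_eq_nil_iff.mpr (by intro a ha; simpa using hdrop a ha)]
    simp
  · conv_rhs => rw [hsplit]
    rw [List.filter_append, List.filter_eq_nil_iff.mpr (by intro a ha; simpa using htake a ha),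
      List.filter_eq_self.mpr hdrop]
    simp

-- sum of (h - n) over a list, in closed form
theorem sum_map_sub (xs : List Int) (n : Int) :
    (xs.map (fun h => h - n)).sum = xs.sum - n * xs.length := by
  induction xs with
  | nil => simp
  | cons x t ih =>
    rw [List.map_cons, List.sum_cons, ih, List.sum_cons, List.length_cons]
    push_cast; ring

-- ===== VERDICT (by name: the statement is the Claim_ definition above) =====
theorem get_dist_sum_spec : Claim_equal_get_dist_sum := by
  intro houses n _
  show get_dist_sum houses n = get_dist_sum_alt houses n
  set hs := PySem.List.sorted houses (fun x => x) false with hhs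
  have hperm : hs.Perm houses := PySem.List.sorted_perm houses (fun x => x) false
  have hpair : hs.Pairwise (fun a b => a ≤ b) := by
    have := PySem.List.sorted_pairwise houses (fun x => x)
    simpa using this
  obtain ⟨hk, hbelow, habove⟩ :=
    bsearch_spec hs n hpair 0 hs.length (Nat.zero_le _) (le_refl _)
      (by intro j hj _; omega) (by intro j hj hjl; omega)
  set k := bsearch hs n 0 hs.length with hkdef
  obtain ⟨htake, hdrop⟩ := take_eq_filter hs n k hk hbelow habove
  have hfb : (hs.filter (fun h => h < n)).Perm (houses.filter (fun h => h < n)) :=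
    hperm.filter _
  have hfa : (hs.filter (fun h => ¬ h < n)).Perm (houses.filter (fun h => ¬ h < n)) :=
    hperm.filter _
  have hsliceb : PySem.List.slice hs none (some (k : Int)) = hs.take k := by
    rw [PySem.List.slice_to hs (by positivity)]; simp
  have hslicea : PySem.List.slice hs (some (k : Int)) none = hs.drop k := by
    rw [PySem.List.slice_from hs (by positivity)]; simp
  have hb := left_sum_nonpos houses n
  simp only [get_dist_sum, get_dist_sum_alt, ← hhs, ← hkdef, hsliceb, hslicea,
    htake, hdrop]
  rw [get_dist_sum_fold houses n 0 0 0]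
  simp only [zero_add, Prod.mk.injEq]
  have hb' : (houses.filter (fun h => h < n)).sum
      - n * ((houses.filter (fun h => h < n)).length : Int) ≤ 0 := by
    rw [← sum_map_sub]; exact hb
  refine ⟨?_, ?_, ?_⟩ <;>
    simp only [sum_map_sub, hfb.sum_eq, hfb.length_eq,
      hfa.sum_eq, hfa.length_eq, abs_of_nonpos hb'] <;>
    ring
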